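-- pv_equiv track=rewrite | github.com/astranero/tira | findodd.py | find
-- ===== SOURCE A (Python) =====
-- def find(t):
--
--     kirja = {}
--     for alkio in t:
--         kirja[alkio] = 0
--
--     for alkio in t:
--         kirja[alkio] += 1
--
--     luku = 0
--     for alkio in t:
--         if kirja[alkio] == 1:
--             luku = alkio
--     return luku
-- ===== SOURCE B (Python) =====
-- def find(t):
--     # Successive elimination from the back: if the last element is unique it is
--     # the answer; otherwise delete all its occurrences (their counts are >= 2,
--     # other counts are unchanged) and repeat on the shrunken list.
--     t = list(t)
--     while t:
--         x = t[-1]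
--         rest = t[:-1]
--         if x in rest:
--             t = [e for e in rest if e != x]
--         else:
--             return x
--     return 0
-- ===== Notes on version B (the rewrite author's own statement) =====
-- stated objective: alternative
-- what changed: Replaced the build-frequency-dictionary-then-scan approach with successive elimination from the back: if the last element is unique return it, otherwise delete all of its occurrences and repeat on the shrunken list; no frequency table is ever built.
import Mathlib
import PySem

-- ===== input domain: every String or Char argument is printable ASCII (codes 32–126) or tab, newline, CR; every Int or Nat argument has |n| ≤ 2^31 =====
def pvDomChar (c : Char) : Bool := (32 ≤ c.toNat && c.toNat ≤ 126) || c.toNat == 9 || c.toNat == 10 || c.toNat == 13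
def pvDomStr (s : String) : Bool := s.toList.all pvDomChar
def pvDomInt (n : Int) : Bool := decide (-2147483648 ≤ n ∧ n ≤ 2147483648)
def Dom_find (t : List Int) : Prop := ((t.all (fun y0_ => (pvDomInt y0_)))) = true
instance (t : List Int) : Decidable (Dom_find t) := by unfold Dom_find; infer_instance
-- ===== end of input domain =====

-- B replaces A's count-dictionary-then-scan with successive elimination from the
-- back (last element unique → answer, else delete all its copies and repeat);
-- objective: alternative decomposition, no frequency table at all.

-- ===== PORT A =====
def find (t : List Int) : Int :=
  -- kirja = {}; for alkio in t: kirja[alkio] = 0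
  let kirja : PySem.Dict Int Int := t.foldl (fun d x => d.insert x 0) PySem.Dict.empty
  -- for alkio in t: kirja[alkio] += 1   (key always present; lookup ported as getD)
  let kirja := t.foldl (fun d x => d.insert x (d.getD x 0 + 1)) kirja
  -- luku = 0; for alkio in t: if kirja[alkio] == 1: luku = alkio
  t.foldl (fun luku x => if kirja.getD x 0 == 1 then x else luku) 0

-- ===== PORT B =====
-- while t: x = t[-1]; rest = t[:-1]; if x in rest: t = [e for e in rest if e != x]
--         else: return x
-- return 0     (t[-1]/t[:-1] on nonempty t are exactly getLast/dropLast)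
def find_alt (t : List Int) : Int :=
  if h : t = [] then 0
  else
    let x := t.getLast h
    let rest := t.dropLast
    if x ∈ rest then find_alt (rest.filter (fun e => e ≠ x)) else x
termination_by t.length
decreasing_by
  calc (List.filter (fun e => e ≠ x) rest).length
      ≤ rest.length := List.length_filter_le _ _
    _ < t.length := by
        simp only [rest, List.length_dropLast]
        have := List.length_pos_iff.mpr h
        omega

-- ===== PRECONDITION & SPEC =====
def Spec_find (t : List Int) (out : Int) : Prop := out = find_alt t
instance (t : List Int) (out : Int) : Decidable (Spec_find t out) := by unfold Spec_find; infer_instance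

-- ===== CLAIM (what is proved, stated in full; the proofs are below) =====
def Claim_equal_find : Prop := ∀ (t : List Int), Dom_find t → Spec_find t (find t)

-- ===== LEMMAS AND PROOFS =====

-- After the zero-initialisation pass, every key reads 0 under default 0.
theorem getD_zero_pass (t : List Int) (d : PySem.Dict Int Int) (v : Int)
    (h : d.getD v 0 = 0) :
    (t.foldl (fun d x => d.insert x 0) d).getD v 0 = 0 := by
  induction t generalizing d with
  | nil => simpa using h
  | cons a l ih =>
    simp only [List.foldl_cons]
    exact ih _ (by rw [PySem.Dict.getD_insert]; split <;> simp [h])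

-- The finished dictionary maps every value to its count in t.
theorem kirja_getD (t : List Int) (v : Int) :
    ((t.foldl (fun d x => d.insert x (d.getD x 0 + 1))
        (t.foldl (fun d x => d.insert x 0) PySem.Dict.empty)).getD v 0)
      = (t.count v : Int) := by
  rw [PySem.Dict.getD_foldl_insert_add_one,
      getD_zero_pass t PySem.Dict.empty v (by simp [PySem.Dict.getD])]
  simp

-- "last wins" fold with a fixed predicate = first hit scanning the reverse.
theorem foldl_lastWins (p : Int → Bool) (t : List Int) :
    t.foldl (fun luku x => if p x then x else luku) 0
      = (t.reverse.find? p).getD 0 := by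
  induction t using List.reverseRecOn with
  | nil => simp
  | append_singleton s a ih =>
    simp only [List.foldl_append, List.foldl_cons, List.foldl_nil,
      List.reverse_append, List.reverse_cons, List.reverse_nil, List.nil_append,
      List.cons_append, List.find?_cons]
    cases hp : p a <;> simp [ih]

-- find? only looks at the predicate's values on members.
theorem pvFindCongr (p q : Int → Bool) (l : List Int)
    (h : ∀ x ∈ l, p x = q x) : l.find? p = l.find? q := by
  induction l with
  | nil => rfl
  | cons a l ih =>
    simp only [List.find?_cons, h a (by simp)]
    cases q a
    · exact ih fun x hx => h x (by simp [hx])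
    · rfl

-- elements failing the predicate may be filtered out before find?.
theorem pvFindFilterFalse (p : Int → Bool) (a : Int) (l : List Int)
    (hp : p a = false) : l.find? p = (l.filter (fun e => e ≠ a)).find? p := by
  induction l with
  | nil => rfl
  | cons b l ih =>
    by_cases hb : b = a
    · subst hb; simp [hp, ih]
    · simp only [List.filter_cons, List.find?_cons, hb, decide_true, ne_eq,
        not_false_iff, if_pos]
      cases p b <;> simp [ih]

-- B computes the first element of the reversed list whose count in t is 1.
theorem pvAltEqFind (t : List Int) :
    find_alt t = (t.reverse.find? (fun x => t.count x == 1)).getD 0 := by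
  induction t using find_alt.induct with
  | case1 => simp [find_alt]
  | case2 t h x rest hmem ih =>
    have hsplit : rest ++ [x] = t := List.dropLast_append_getLast h
    have hrev : t.reverse = x :: rest.reverse := by
      rw [← hsplit]; simp
    have hcx : t.count x = rest.count x + 1 := by
      rw [← hsplit]; simp [List.count_append]
    have hge : 1 ≤ rest.count x := List.one_le_count_iff.mpr hmem
    have hfalse : (t.count x == 1) = false := by
      simp only [beq_eq_false_iff_ne, ne_eq]; omega
    rw [find_alt]
    rw [dif_neg h, if_pos hmem, ih]
    simp only [hrev, List.find?_cons, hfalse]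
    conv_rhs => rw [pvFindFilterFalse _ x _ hfalse, List.filter_reverse]
    congr 1
    apply pvFindCongr
    intro y hy
    rw [List.mem_reverse, List.mem_filter] at hy
    obtain ⟨hys, hyne⟩ := hy
    have hyx : y ≠ x := by simpa using hyne
    have h1 : t.count y = rest.count y := by
      rw [← hsplit]; simp [List.count_append, Ne.symm hyx]
    have h2 : (rest.filter (fun e => e ≠ x)).count y = rest.count y := by
      rw [List.count_filter]; simp [hyx]
    rw [h1, h2]
  | case3 t h x rest hmem =>
    have hsplit : rest ++ [x] = t := List.dropLast_append_getLast h
    have hrev : t.reverse = x :: rest.reverse := by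
      rw [← hsplit]; simp
    have hcx : (t.count x == 1) = true := by
      rw [← hsplit]
      simp [List.count_append, List.count_eq_zero_of_not_mem hmem]
    rw [find_alt]
    rw [dif_neg h, if_neg hmem]
    simp only [hrev, List.find?_cons, hcx, Option.getD_some]
    rfl

-- ===== VERDICT (by name: the statement is the Claim_ definition above) =====
theorem find_spec : Claim_equal_find := by
  intro t _
  unfold Spec_find find
  simp only []
  rw [foldl_lastWins, pvAltEqFind]
  congr 1
  apply pvFindCongr
  intro x _
  rw [kirja_getD]
  rcases eq_or_ne (t.count x) 1 with hc | hc
  · simp [hc]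
  · have hci : ((t.count x : Int)) ≠ 1 := by exact_mod_cast hc
    simp [hc, hci]
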